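-- pv_equiv track=rewrite | github.com/hardtogetA/CTANet | VOC/get_data.py | choose_fold
-- ===== SOURCE A (Python) =====
-- all_classes = [1, 2, 3, 4, 5, 6, 7, 8, 9, 10, 11, 12, 13, 14, 15, 16, 17, 18, 19, 20]
--
-- fold_0 = [1, 2, 3, 4, 5]
--
-- fold_1 = [6, 7, 8, 9, 10]
--
-- fold_2 = [11, 12, 13, 14, 15]
--
-- fold_3 = [16, 17, 18, 19, 20]
--
-- def choose_fold(index):
--     if index == 0:
--         train_class = [x for x in all_classes if x not in fold_0]
--         test_class = fold_0
--     elif index == 1: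
--         train_class = [x for x in all_classes if x not in fold_1]
--         test_class = fold_1
--     elif index == 2:
--         train_class = [x for x in all_classes if x not in fold_2]
--         test_class = fold_2
--     elif index == 3:
--         train_class = [x for x in all_classes if x not in fold_3]
--         test_class = fold_3
--     else:
--         train_class = []
--         test_class = []
--     return train_class, test_class
-- ===== SOURCE B (Python) =====
-- def choose_fold(index):
--     # Fold i is the contiguous block 5*i+1 .. 5*i+5, so both halves of the
--     # split are arithmetic ranges; no fold tables and no membership filtering.
--     if 0 <= index <= 3:
--         lo = 5 * index
--         test_class = list(range(lo + 1, lo + 6))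
--         train_class = list(range(1, lo + 1)) + list(range(lo + 6, 21))
--         return train_class, test_class
--     return [], []
-- ===== Notes on version B (the rewrite author's own statement) =====
-- stated objective: alternative
-- what changed: Exploits that each fold is the contiguous block 5*i+1..5*i+5: B computes both test_class and train_class as closed-form arithmetic ranges (range calls), eliminating the fold constants, the if/elif cascade and the membership-filter comprehension entirely.
import Mathlib
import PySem

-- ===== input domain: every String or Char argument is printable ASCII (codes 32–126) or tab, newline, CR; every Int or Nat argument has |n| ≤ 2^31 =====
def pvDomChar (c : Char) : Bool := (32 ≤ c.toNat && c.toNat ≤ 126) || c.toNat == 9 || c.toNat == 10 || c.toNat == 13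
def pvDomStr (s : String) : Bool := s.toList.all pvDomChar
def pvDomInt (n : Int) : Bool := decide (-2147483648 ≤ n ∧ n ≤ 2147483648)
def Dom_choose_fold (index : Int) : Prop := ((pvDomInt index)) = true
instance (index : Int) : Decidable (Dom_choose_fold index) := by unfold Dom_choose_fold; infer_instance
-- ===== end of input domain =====

-- B computes both halves of the split as closed-form arithmetic ranges instead of
-- fold tables, an if/elif cascade and a membership filter (alternative; same cost).

-- ===== PORT A =====
def all_classes : List Int := [1, 2, 3, 4, 5, 6, 7, 8, 9, 10, 11, 12, 13, 14, 15, 16, 17, 18, 19, 20]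
def fold_0 : List Int := [1, 2, 3, 4, 5]
def fold_1 : List Int := [6, 7, 8, 9, 10]
def fold_2 : List Int := [11, 12, 13, 14, 15]
def fold_3 : List Int := [16, 17, 18, 19, 20]

def choose_fold (index : Int) : List Int × List Int :=
  if index = 0 then
    (all_classes.filter (fun x => !(fold_0.contains x)), fold_0)
  else if index = 1 then
    (all_classes.filter (fun x => !(fold_1.contains x)), fold_1)
  else if index = 2 then
    (all_classes.filter (fun x => !(fold_2.contains x)), fold_2)
  else if index = 3 then
    (all_classes.filter (fun x => !(fold_3.contains x)), fold_3)
  else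
    ([], [])

-- ===== PORT B =====
def choose_fold_alt (index : Int) : List Int × List Int :=
  if 0 ≤ index ∧ index ≤ 3 then
    let lo := 5 * index
    (PySem.List.pyRange 1 (lo + 1) 1 ++ PySem.List.pyRange (lo + 6) 21 1,
     PySem.List.pyRange (lo + 1) (lo + 6) 1)
  else ([], [])

-- ===== PRECONDITION & SPEC =====
def Spec_choose_fold (index : Int) (out : List Int × List Int) : Prop := out = choose_fold_alt index
instance (index : Int) (out : List Int × List Int) : Decidable (Spec_choose_fold index out) := by unfold Spec_choose_fold; infer_instance

-- ===== CLAIM (what is proved, stated in full; the proofs are below) =====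
def Claim_equal_choose_fold : Prop := ∀ (index : Int), Dom_choose_fold index → Spec_choose_fold index (choose_fold index)

-- ===== LEMMAS AND PROOFS =====

-- ===== VERDICT (by name: the statement is the Claim_ definition above) =====
theorem choose_fold_spec : Claim_equal_choose_fold := by
  intro index _
  unfold Spec_choose_fold choose_fold choose_fold_alt
  by_cases h0 : index = 0
  · subst h0; decide
  by_cases h1 : index = 1
  · subst h1; decide
  by_cases h2 : index = 2
  · subst h2; decide
  by_cases h3 : index = 3
  · subst h3; decide
  have : ¬ (0 ≤ index ∧ index ≤ 3) := by omega
  simp [h0, h1, h2, h3, this]
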